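-- pv_equiv track=rewrite | github.com/isinmert/LTL-RL | src/reinforcement_learning/utils.py | compress_trace_spaced
-- ===== SOURCE A (Python) =====
-- def compress_trace_spaced(trace):
--     """
--     This function compresses a trace by removing consecutive empty sets and
--     places one empty set instead of them. The output is a list of sets.
--     """
--     compressed_trace = []
--     last_obs_empty = False
--
--     for observations in trace:
--         card_obs = len(observations)
--         if card_obs > 0:
--             compressed_trace.append(observations)
--             last_obs_empty = False
--         else:
--             if not last_obs_empty:
--                 compressed_trace.append(observations)
--             else:
--                 pass
--             last_obs_empty = True
--
--     return compressed_trace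
-- ===== SOURCE B (Python) =====
-- def compress_trace_spaced(trace):
--     # Stage 1: pairwise keep-mask (element kept iff it or its predecessor is
--     # non-empty; the first element is always kept).
--     keep = [True] + [len(cur) > 0 or len(prev) > 0
--                      for prev, cur in zip(trace, trace[1:])]
--     # Stage 2: filter by the mask.
--     return [obs for obs, k in zip(trace, keep) if k]
-- ===== Notes on version B (the rewrite author's own statement) =====
-- stated objective: alternative
-- what changed: Replaces A's single stateful loop (last_obs_empty flag) with two stateless staged passes: first a pairwise zip builds a boolean keep-mask (keep an element iff it or its predecessor is non-empty, the first always kept), then a filter by that mask produces the result.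
import Mathlib
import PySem

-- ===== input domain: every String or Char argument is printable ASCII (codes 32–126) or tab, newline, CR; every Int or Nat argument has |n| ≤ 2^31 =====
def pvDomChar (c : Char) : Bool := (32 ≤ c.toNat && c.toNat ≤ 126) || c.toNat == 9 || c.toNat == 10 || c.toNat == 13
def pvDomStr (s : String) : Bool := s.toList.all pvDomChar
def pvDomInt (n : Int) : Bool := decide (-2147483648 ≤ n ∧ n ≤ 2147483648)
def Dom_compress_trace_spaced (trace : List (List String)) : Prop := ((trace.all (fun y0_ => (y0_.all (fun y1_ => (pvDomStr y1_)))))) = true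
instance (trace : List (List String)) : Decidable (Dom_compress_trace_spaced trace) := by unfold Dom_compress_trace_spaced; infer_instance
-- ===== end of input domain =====

-- B replaces A's single stateful flag loop with two stateless staged passes
-- (a pairwise keep-mask, then a filter by the mask); alternative decomposition, same cost.

-- ===== PORT A =====
-- the loop body: state = (compressed_trace, last_obs_empty)
def ctsLoop (st : List (List String) × Bool) (observations : List String) : List (List String) × Bool :=
  if observations.length > 0 then (st.1 ++ [observations], false)
  else if !st.2 then (st.1 ++ [observations], true)
  else (st.1, true)

def compress_trace_spaced (trace : List (List String)) : List (List String) :=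
  (trace.foldl ctsLoop ([], false)).1

-- ===== PORT B =====
-- Python: keep = [True] + [len(cur)>0 or len(prev)>0 for prev,cur in zip(trace, trace[1:])]
--         return [obs for obs, k in zip(trace, keep) if k]
-- (trace[1:] on a list is exactly List.drop 1)
def compress_trace_spaced_alt (trace : List (List String)) : List (List String) :=
  let keep : List Bool :=
    true :: (trace.zip (trace.drop 1)).map
      (fun pc => decide (pc.2.length > 0) || decide (pc.1.length > 0))
  ((trace.zip keep).filter (fun ok => ok.2)).map (fun ok => ok.1)

-- ===== PRECONDITION & SPEC =====
def Spec_compress_trace_spaced (trace : List (List String)) (out : List (List String)) : Prop := out = compress_trace_spaced_alt trace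
instance (trace : List (List String)) (out : List (List String)) : Decidable (Spec_compress_trace_spaced trace out) := by unfold Spec_compress_trace_spaced; infer_instance

-- ===== CLAIM (what is proved, stated in full; the proofs are below) =====
def Claim_equal_compress_trace_spaced : Prop := ∀ (trace : List (List String)), Dom_compress_trace_spaced trace → Spec_compress_trace_spaced trace (compress_trace_spaced trace)

-- ===== LEMMAS AND PROOFS =====

-- tail-form of A's loop: what A appends after the prefix acc, given the flag b
def ctsGo (b : Bool) : List (List String) → List (List String)
  | [] => []
  | x :: xs =>
    if x.length > 0 then x :: ctsGo false xs
    else if b then ctsGo true xs else x :: ctsGo true xs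

lemma ctsLoop_foldl (trace : List (List String)) :
    ∀ (acc : List (List String)) (b : Bool),
      (trace.foldl ctsLoop (acc, b)).1 = acc ++ ctsGo b trace := by
  induction trace with
  | nil => intro acc b; simp [ctsGo]
  | cons x xs ih =>
    intro acc b
    by_cases hx : x.length > 0
    · simp [ctsLoop, ctsGo, hx, ih, List.append_assoc]
    · cases b <;> simp [ctsLoop, ctsGo, hx, ih, List.append_assoc]

-- the pairwise mask of B, in recursive form with an explicit predecessor
def ctsMask (p : List String) : List (List String) → List Bool
  | [] => []
  | c :: cs => (decide (c.length > 0) || decide (p.length > 0)) :: ctsMask c cs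

lemma zip_map_mask (xs : List (List String)) :
    ∀ p, (((p :: xs).zip xs).map
      (fun pc => decide (pc.2.length > 0) || decide (pc.1.length > 0))) = ctsMask p xs := by
  induction xs with
  | nil => intro p; simp [ctsMask]
  | cons c cs ih => intro p; simp [ctsMask, ih c]

lemma filter_mask (xs : List (List String)) :
    ∀ p, ((xs.zip (ctsMask p xs)).filter (fun ok => ok.2)).map (fun ok => ok.1)
      = ctsGo (!decide (p.length > 0)) xs := by
  induction xs with
  | nil => intro p; simp [ctsGo]
  | cons c cs ih =>
    intro p
    by_cases hc : c.length > 0 <;> by_cases hp : p.length > 0 <;>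
      simp [ctsMask, ctsGo, hc, hp, ih c]

lemma alt_eq_go (trace : List (List String)) :
    compress_trace_spaced_alt trace = ctsGo false trace := by
  cases trace with
  | nil => rfl
  | cons x xs =>
    unfold compress_trace_spaced_alt
    simp only [List.drop_succ_cons, List.drop_zero, zip_map_mask xs x, List.zip_cons_cons,
      List.filter_cons, if_pos trivial, List.map_cons]
    rw [filter_mask xs x]
    by_cases hx : x.length > 0 <;> simp [ctsGo, hx]

-- ===== VERDICT (by name: the statement is the Claim_ definition above) =====
theorem compress_trace_spaced_spec : Claim_equal_compress_trace_spaced := by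
  intro trace _
  unfold Spec_compress_trace_spaced compress_trace_spaced
  rw [ctsLoop_foldl, alt_eq_go]
  simp
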